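-- pv_equiv track=rewrite | github.com/arieshsieh0402/LeetCode-Practice | 828_count_unique_characters_of_all_substrings_of_a_given_string.py | unique_letter_string_brute
-- ===== SOURCE A (Python) =====
-- from collections import Counter
--
-- def unique_letter_string_brute(s: str) -> int:
--     def count_unique_chars(s: str) -> int:
--         unique_chars_dict = Counter(s)
--         return len([key for key, val in unique_chars_dict.items() if val == 1])
--
--     sub_char_dict = {}
--     length_count = 0
--
--     for i in range(len(s)):
--         for j in range(i, len(s)):
--             sub_string = s[i:j + 1]
--             if sub_string not in sub_char_dict:
--                 sub_char_dict[sub_string] = count_unique_chars(sub_string)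
--             length_count += sub_char_dict[sub_string]
--
--     return length_count
-- ===== SOURCE B (Python) =====
-- def unique_letter_string_brute(s: str) -> int:
--     # Incremental sliding extension: for each start i, extend the end j one
--     # character at a time, maintaining the character counts and the number of
--     # currently-unique characters, instead of recomputing a Counter per slice.
--     total = 0
--     n = len(s)
--     for i in range(n):
--         cnt = {}
--         u = 0
--         for j in range(i, n):
--             c = s[j]
--             k = cnt.get(c, 0)
--             if k == 0:
--                 u += 1
--             elif k == 1:
--                 u -= 1
--             cnt[c] = k + 1
--             total += u
--     return total
-- ===== Notes on version B (the rewrite author's own statement) =====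
-- stated objective: faster
-- what changed: Instead of recomputing a Counter for every substring slice (memoized in a substring-keyed dict), B extends each substring one character at a time, incrementally maintaining the character counts and the number of currently-unique characters.
import Mathlib
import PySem

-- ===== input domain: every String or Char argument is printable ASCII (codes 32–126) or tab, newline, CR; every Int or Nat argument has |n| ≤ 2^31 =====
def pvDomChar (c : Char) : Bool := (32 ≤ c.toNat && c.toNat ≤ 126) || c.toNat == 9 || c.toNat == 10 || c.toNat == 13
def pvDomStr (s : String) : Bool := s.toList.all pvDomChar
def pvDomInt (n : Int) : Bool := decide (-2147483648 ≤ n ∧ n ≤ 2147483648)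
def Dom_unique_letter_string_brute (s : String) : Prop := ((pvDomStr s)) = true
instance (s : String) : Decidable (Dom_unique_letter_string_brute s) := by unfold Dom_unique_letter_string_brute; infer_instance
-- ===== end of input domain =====

-- B replaces A's per-substring Counter recomputation (with a substring-keyed memo dict) by an
-- incremental extension of each substring one character at a time, maintaining the running
-- character counts and the number of currently-unique characters; objective: faster.

-- ===== PORT A =====
-- A's inner helper count_unique_chars: Counter(s), then len([key for key, val in items if val == 1])
def pvCUC (t : List Char) : Int :=
  (((PySem.Dict.counter t).items.filter (fun kv => kv.2 == 1)).length : Int)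

def unique_letter_string_brute (s : String) : Int :=
  let l := s.toList
  let res := (PySem.List.pyRange 0 (l.length : Int) 1).foldl
    (fun (st : PySem.Dict (List Char) Int × Int) i =>
      (PySem.List.pyRange i (l.length : Int) 1).foldl
        (fun (st : PySem.Dict (List Char) Int × Int) j =>
          let sub := PySem.List.slice l (some i) (some (j + 1))
          let d := if st.1.contains sub then st.1 else st.1.insert sub (pvCUC sub)
          (d, st.2 + d.getD sub 0)) st)
    (PySem.Dict.empty, 0)
  res.2

-- ===== PORT B =====
def unique_letter_string_brute_alt (s : String) : Int :=
  let l := s.toList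
  (PySem.List.pyRange 0 (l.length : Int) 1).foldl
    (fun (total : Int) i =>
      ((PySem.List.pyRange i (l.length : Int) 1).foldl
        (fun (st : PySem.Dict Char Int × Int × Int) j =>
          let c := PySem.List.pyGetD l j ' '
          let k := st.1.getD c 0
          let u := if k = 0 then st.2.1 + 1 else if k = 1 then st.2.1 - 1 else st.2.1
          (st.1.insert c (k + 1), u, st.2.2 + u))
        (PySem.Dict.empty, 0, total)).2.2)
    0

-- ===== PRECONDITION & SPEC =====
def Spec_unique_letter_string_brute (s : String) (out : Int) : Prop := out = unique_letter_string_brute_alt s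
instance (s : String) (out : Int) : Decidable (Spec_unique_letter_string_brute s out) := by unfold Spec_unique_letter_string_brute; infer_instance

-- ===== CLAIM (what is proved, stated in full; the proofs are below) =====
def Claim_equal_unique_letter_string_brute : Prop := ∀ (s : String), Dom_unique_letter_string_brute s → Spec_unique_letter_string_brute s (unique_letter_string_brute s)

-- ===== LEMMAS AND PROOFS =====

-- pvCUC counts the distinct characters of t occurring exactly once in t
theorem pvCUC_eq (t : List Char) :
    pvCUC t = (((PySem.Set.ofList t).countP (fun k => (t.count k : Int) == 1)) : Int) := by
  unfold pvCUC
  rw [PySem.Dict.items_counter, ← List.countP_eq_length_filter, List.countP_map]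
  rfl

-- counting with a predicate changed only at one element of a Nodup list
theorem pv_countP_delta (S : List Char) (c : Char) (p q : Char → Bool)
    (hS : S.Nodup) (hc : c ∈ S) (h : ∀ k ∈ S, k ≠ c → p k = q k) :
    (S.countP q : Int) = (S.countP p : Int) +
      ((if q c then (1 : Int) else 0) - (if p c then (1 : Int) else 0)) := by
  induction S with
  | nil => cases hc
  | cons a S ih =>
    rw [List.countP_cons, List.countP_cons]
    rcases List.nodup_cons.mp hS with ⟨ha, hS'⟩
    by_cases hac : a = c
    · subst hac
      have : S.countP q = S.countP p :=
        List.countP_congr (fun k hk => by rw [h k (List.mem_cons_of_mem _ hk) (fun hkc => ha (hkc ▸ hk))])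
      rw [this]; push_cast; split_ifs <;> omega
    · rcases List.mem_cons.mp hc with h1 | h2
      · exact absurd h1.symm hac
      · have := ih hS' h2 (fun k hk hkc => h k (List.mem_cons_of_mem _ hk) hkc)
        have hpq : p a = q a := h a List.mem_cons_self hac
        rw [← hpq]; push_cast at this ⊢; split_ifs at this ⊢ <;> omega

-- the incremental step of the unique-character count when one character is appended
theorem pvCUC_append (t : List Char) (c : Char) :
    pvCUC (t ++ [c]) = pvCUC t +
      (if t.count c = 0 then (1 : Int) else if t.count c = 1 then -1 else 0) := by
  rw [pvCUC_eq, pvCUC_eq]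
  have hset : PySem.Set.ofList (t ++ [c]) = (PySem.Set.ofList t).add c := by
    rw [PySem.Set.ofList_append]; rfl
  have hcnt : ∀ k : Char, (t ++ [c]).count k = t.count k + (if k = c then 1 else 0) := by
    intro k
    rcases eq_or_ne k c with rfl | hne
    · simp [List.count_append]
    · simp [List.count_append, hne, Ne.symm hne]
  by_cases hc : c ∈ t
  · rw [hset, PySem.Set.add_of_mem (by rwa [PySem.Set.mem_ofList])]
    have := pv_countP_delta (PySem.Set.ofList t) c
      (fun k => (t.count k : Int) == 1) (fun k => ((t ++ [c]).count k : Int) == 1)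
      (PySem.Set.nodup_ofList t) (by rwa [PySem.Set.mem_ofList])
      (fun k _ hkc => by simp [hcnt k, hkc])
    rw [this]
    have h1 : 1 ≤ t.count c := List.one_le_count_iff.mpr hc
    by_cases h2 : t.count c = 1
    · simp [hcnt, h2]
    · have h3 : t.count c ≠ 0 := by omega
      have h4 : t.count c + 1 ≠ 1 := by omega
      simp [hcnt, h2, h3]
  · rw [hset, PySem.Set.add_of_not_mem (by rwa [PySem.Set.mem_ofList])]
    rw [List.countP_append]
    have h0 : t.count c = 0 := List.count_eq_zero.mpr hc
    have : (PySem.Set.ofList t).countP (fun k => ((t ++ [c]).count k : Int) == 1)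
        = (PySem.Set.ofList t).countP (fun k => (t.count k : Int) == 1) := by
      apply List.countP_congr
      intro k hk
      have : k ≠ c := fun hkc => hc (hkc ▸ (PySem.Set.mem_ofList t k).mp hk)
      simp [hcnt k, this]
    rw [this]
    simp [h0]

theorem pv_slice_self (l : List Char) (i : Int) (h0 : 0 ≤ i) (hi : i ≤ (l.length : Int)) :
    PySem.List.slice l (some i) (some i) = [] := by
  rw [PySem.List.slice_of_nonneg l h0 h0 hi hi]; simp

-- extending the slice l[i:j+1] = l[i:j] + [l[j]]
theorem pv_slice_succ (l : List Char) (i j : Int) (h0 : 0 ≤ i) (hij : i ≤ j)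
    (hj : j < (l.length : Int)) :
    PySem.List.slice l (some i) (some (j + 1)) =
      PySem.List.slice l (some i) (some j) ++ [l[j.toNat]'(by omega)] := by
  rw [PySem.List.slice_of_nonneg l h0 (by omega) (by omega) (by omega),
      PySem.List.slice_of_nonneg l h0 (by omega) (by omega) (by omega)]
  have h1 : (j + 1).toNat - i.toNat = (j.toNat - i.toNat) + 1 := by omega
  rw [h1, List.take_add_one]
  have h2 : j.toNat - i.toNat < (l.drop i.toNat).length := by
    rw [List.length_drop]; omega
  rw [List.getElem?_eq_getElem h2]
  simp only [Option.toList_some]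
  rw [List.getElem_drop]
  have hidx : i.toNat + (j.toNat - i.toNat) = j.toNat := by omega
  simp [hidx]

-- B's inner loop, generalized over the running index j: starting from the state reached after
-- processing l[i:j], it adds the unique-char count of every extension l[i:jj+1], jj in range(j, n)
theorem pv_B_inner (l : List Char) (i : Int) (h0 : 0 ≤ i) :
    ∀ (j tot : Int), i ≤ j → j ≤ (l.length : Int) →
    ((PySem.List.pyRange j (l.length : Int) 1).foldl
        (fun (st : PySem.Dict Char Int × Int × Int) j =>
          let c := PySem.List.pyGetD l j ' '
          let k := st.1.getD c 0
          let u := if k = 0 then st.2.1 + 1 else if k = 1 then st.2.1 - 1 else st.2.1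
          (st.1.insert c (k + 1), u, st.2.2 + u))
        ((PySem.List.slice l (some i) (some j)).foldl
            (fun d x => d.insert x (d.getD x 0 + 1)) PySem.Dict.empty,
          pvCUC (PySem.List.slice l (some i) (some j)), tot)).2.2
      = tot + ((PySem.List.pyRange j (l.length : Int) 1).map
          (fun jj => pvCUC (PySem.List.slice l (some i) (some (jj + 1))))).sum := by
  suffices H : ∀ (m : Nat) (j tot : Int), i ≤ j → j ≤ (l.length : Int) →
      ((l.length : Int) - j).toNat = m →
      ((PySem.List.pyRange j (l.length : Int) 1).foldl
        (fun (st : PySem.Dict Char Int × Int × Int) j =>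
          let c := PySem.List.pyGetD l j ' '
          let k := st.1.getD c 0
          let u := if k = 0 then st.2.1 + 1 else if k = 1 then st.2.1 - 1 else st.2.1
          (st.1.insert c (k + 1), u, st.2.2 + u))
        ((PySem.List.slice l (some i) (some j)).foldl
            (fun d x => d.insert x (d.getD x 0 + 1)) PySem.Dict.empty,
          pvCUC (PySem.List.slice l (some i) (some j)), tot)).2.2
      = tot + ((PySem.List.pyRange j (l.length : Int) 1).map
          (fun jj => pvCUC (PySem.List.slice l (some i) (some (jj + 1))))).sum by
    intro j tot hij hjn
    exact H _ j tot hij hjn rfl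
  intro m
  induction m with
  | zero =>
    intro j tot hij hjn hm
    rw [PySem.List.pyRange_one_eq_nil (by omega)]
    simp
  | succ m ih =>
    intro j tot hij hjn hm
    have hjlt : j < (l.length : Int) := by omega
    rw [PySem.List.pyRange_one_cons hjlt, List.foldl_cons, List.map_cons]
    set t := PySem.List.slice l (some i) (some j) with ht
    have hc : PySem.List.pyGetD l j ' ' = l[j.toNat]'(by omega) :=
      PySem.List.pyGetD_eq_getElem l ' ' (by omega) hjlt
    have hk : (t.foldl (fun d x => d.insert x (d.getD x 0 + 1)) PySem.Dict.empty).getD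
        (l[j.toNat]'(by omega)) 0 = (t.count (l[j.toNat]'(by omega)) : Int) := by
      rw [PySem.Dict.getD_foldl_insert_add_one, PySem.Dict.getD_empty]; ring
    have hstep : PySem.List.slice l (some i) (some (j + 1)) = t ++ [l[j.toNat]'(by omega)] :=
      pv_slice_succ l i j h0 hij hjlt
    have hu : (if (t.count (l[j.toNat]'(by omega)) : Int) = 0 then pvCUC t + 1
          else if (t.count (l[j.toNat]'(by omega)) : Int) = 1 then pvCUC t - 1 else pvCUC t)
        = pvCUC (PySem.List.slice l (some i) (some (j + 1))) := by
      rw [hstep, pvCUC_append]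
      split_ifs <;> push_cast at * <;> omega
    have hctr : (t.foldl (fun d x => d.insert x (d.getD x (0:Int) + 1)) PySem.Dict.empty).insert
          (l[j.toNat]'(by omega))
          ((t.foldl (fun d x => d.insert x (d.getD x (0:Int) + 1)) PySem.Dict.empty).getD
            (l[j.toNat]'(by omega)) 0 + 1)
        = (PySem.List.slice l (some i) (some (j + 1))).foldl
            (fun d x => d.insert x (d.getD x (0:Int) + 1)) PySem.Dict.empty := by
      rw [hstep, List.foldl_append, List.foldl_cons, List.foldl_nil]
    simp only [hc, hk]
    rw [hu]
    -- make the new state literally the invariant state at j + 1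
    have hctr' : (t.foldl (fun d x => d.insert x (d.getD x 0 + 1)) PySem.Dict.empty).insert
          (l[j.toNat]'(by omega)) ((t.count (l[j.toNat]'(by omega)) : Int) + 1)
        = (PySem.List.slice l (some i) (some (j + 1))).foldl
            (fun d x => d.insert x (d.getD x 0 + 1)) PySem.Dict.empty := by
      rw [← hk]; exact hctr
    rw [hctr']
    have := ih (j + 1) (tot + pvCUC (PySem.List.slice l (some i) (some (j + 1))))
      (by omega) (by omega) (by omega)
    rw [this, List.sum_cons]
    ring

-- invariant of A's memo dict: it only ever stores the value count_unique_chars recomputes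
def pvInvA (d : PySem.Dict (List Char) Int) : Prop :=
  ∀ t, d.contains t = true → d.getD t 0 = pvCUC t

-- the common value: sum over j in range(i, n) of count_unique_chars(l[i:j+1])
def pvG (l : List Char) (i : Int) : Int :=
  ((PySem.List.pyRange i (l.length : Int) 1).map
    (fun j => pvCUC (PySem.List.slice l (some i) (some (j + 1))))).sum

-- A's inner loop, generalized over j and the memo dict, with the invariant threaded through
theorem pv_A_inner (l : List Char) (i : Int) :
    ∀ (m : Nat) (j : Int) (d : PySem.Dict (List Char) Int) (acc : Int),
    j ≤ (l.length : Int) → ((l.length : Int) - j).toNat = m →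
    pvInvA d →
    (((PySem.List.pyRange j (l.length : Int) 1).foldl
        (fun (st : PySem.Dict (List Char) Int × Int) j =>
          let sub := PySem.List.slice l (some i) (some (j + 1))
          let d := if st.1.contains sub then st.1 else st.1.insert sub (pvCUC sub)
          (d, st.2 + d.getD sub 0)) (d, acc)).2
      = acc + ((PySem.List.pyRange j (l.length : Int) 1).map
          (fun jj => pvCUC (PySem.List.slice l (some i) (some (jj + 1))))).sum)
    ∧ pvInvA ((PySem.List.pyRange j (l.length : Int) 1).foldl
        (fun (st : PySem.Dict (List Char) Int × Int) j =>
          let sub := PySem.List.slice l (some i) (some (j + 1))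
          let d := if st.1.contains sub then st.1 else st.1.insert sub (pvCUC sub)
          (d, st.2 + d.getD sub 0)) (d, acc)).1 := by
  intro m
  induction m with
  | zero =>
    intro j d acc hjn hm hinv
    rw [PySem.List.pyRange_one_eq_nil (by omega)]
    simpa using hinv
  | succ m ih =>
    intro j d acc hjn hm hinv
    have hjlt : j < (l.length : Int) := by omega
    rw [PySem.List.pyRange_one_cons hjlt, List.foldl_cons, List.map_cons]
    set sub := PySem.List.slice l (some i) (some (j + 1)) with hsub
    set d' := if d.contains sub then d else d.insert sub (pvCUC sub) with hd'
    have hinv' : pvInvA d' := by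
      rw [hd']
      split_ifs with hcon
      · exact hinv
      · intro t hct
        rw [PySem.Dict.contains_insert] at hct
        rw [PySem.Dict.getD_insert]
        rcases Bool.or_eq_true_iff.mp hct with h1 | h2
        · rw [if_pos (by exact eq_of_beq h1)]
          exact congrArg pvCUC (eq_of_beq h1).symm ▸ rfl
        · by_cases ht : t = sub
          · rw [if_pos ht, ht]
          · rw [if_neg ht]; exact hinv t h2
    have hval : d'.getD sub 0 = pvCUC sub := by
      rw [hd']
      split_ifs with hcon
      · exact hinv sub hcon
      · exact PySem.Dict.getD_insert_self _ _ _ _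
    have := ih (j + 1) d' (acc + d'.getD sub 0) (by omega) (by omega) hinv'
    refine ⟨?_, this.2⟩
    rw [this.1, List.sum_cons, hval]
    ring

-- A's outer loop
theorem pv_A_outer (l : List Char) :
    ∀ (m : Nat) (i : Int) (d : PySem.Dict (List Char) Int) (acc : Int),
    i ≤ (l.length : Int) → ((l.length : Int) - i).toNat = m →
    pvInvA d →
    ((PySem.List.pyRange i (l.length : Int) 1).foldl
      (fun (st : PySem.Dict (List Char) Int × Int) i =>
        (PySem.List.pyRange i (l.length : Int) 1).foldl
          (fun (st : PySem.Dict (List Char) Int × Int) j =>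
            let sub := PySem.List.slice l (some i) (some (j + 1))
            let d := if st.1.contains sub then st.1 else st.1.insert sub (pvCUC sub)
            (d, st.2 + d.getD sub 0)) st) (d, acc)).2
      = acc + ((PySem.List.pyRange i (l.length : Int) 1).map (pvG l)).sum := by
  intro m
  induction m with
  | zero =>
    intro i d acc hin hm hinv
    rw [PySem.List.pyRange_one_eq_nil (by omega)]
    simp
  | succ m ih =>
    intro i d acc hin hm hinv
    have hilt : i < (l.length : Int) := by omega
    rw [PySem.List.pyRange_one_cons hilt, List.foldl_cons, List.map_cons]
    have hin1 := pv_A_inner l i ((((l.length : Int)) - i).toNat) i d acc hin rfl hinv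
    rcases hin1 with ⟨hv, hinv'⟩
    rcases hfold : ((PySem.List.pyRange i (l.length : Int) 1).foldl
        (fun (st : PySem.Dict (List Char) Int × Int) j =>
          let sub := PySem.List.slice l (some i) (some (j + 1))
          let d := if st.1.contains sub then st.1 else st.1.insert sub (pvCUC sub)
          (d, st.2 + d.getD sub 0)) (d, acc)) with ⟨d2, acc2⟩
    rw [hfold] at hv hinv'
    simp only at hv hinv'
    have := ih (i + 1) d2 acc2 (by omega) (by omega) hinv'
    rw [this, hv, List.sum_cons]
    unfold pvG
    ring

-- ===== VERDICT (by name: the statement is the Claim_ definition above) =====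
theorem unique_letter_string_brute_spec : Claim_equal_unique_letter_string_brute := by
  intro s _hdom
  unfold Spec_unique_letter_string_brute
  unfold unique_letter_string_brute unique_letter_string_brute_alt
  simp only []
  set l := s.toList with hl
  have hA := pv_A_outer l (((l.length : Int) - 0).toNat) 0 PySem.Dict.empty 0
    (by omega) rfl (by intro t h; rw [PySem.Dict.contains_empty] at h; cases h)
  rw [hA]
  have hB : (PySem.List.pyRange 0 (l.length : Int) 1).foldl
      (fun (total : Int) i =>
        ((PySem.List.pyRange i (l.length : Int) 1).foldl
          (fun (st : PySem.Dict Char Int × Int × Int) j =>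
            let c := PySem.List.pyGetD l j ' '
            let k := st.1.getD c 0
            let u := if k = 0 then st.2.1 + 1 else if k = 1 then st.2.1 - 1 else st.2.1
            (st.1.insert c (k + 1), u, st.2.2 + u))
          (PySem.Dict.empty, 0, total)).2.2) 0
      = (PySem.List.pyRange 0 (l.length : Int) 1).foldl
          (fun (total : Int) i => total + pvG l i) 0 := by
    apply PySem.List.foldl_congr_mem'
    intro i hi total
    rcases (PySem.List.mem_pyRange_one.mp hi) with ⟨h0i, hiln⟩
    have hnil : PySem.List.slice l (some i) (some i) = [] :=
      pv_slice_self l i h0i (by omega)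
    have hinit : ((PySem.Dict.empty : PySem.Dict Char Int), (0:Int), total)
        = ((PySem.List.slice l (some i) (some i)).foldl
            (fun d x => d.insert x (d.getD x 0 + 1)) PySem.Dict.empty,
          pvCUC (PySem.List.slice l (some i) (some i)), total) := by
      rw [hnil]; rfl
    rw [hinit, pv_B_inner l i h0i i total (le_refl i) (by omega)]
    rfl
  rw [hB, PySem.List.foldl_add]
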